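-- pv_equiv track=rewrite | github.com/Deployia/deployio | ai-service/engines/prompts/base_prompts.py | extract_code_structure_summary
-- ===== SOURCE A (Python) =====
-- from typing import Dict, List, Any, Optional
--
-- def extract_code_structure_summary(repository_data: Dict[str, Any]) -> str:
--     """Extract code structure summary without sending full file contents."""
--     files = repository_data.get('key_files', {})
--     structure_info = []
--
--     # Directory structure indicators
--     has_src = any('src/' in filename for filename in files.keys())
--     has_components = any('components/' in filename for filename in files.keys())
--     has_tests = any('test' in filename.lower() or 'spec' in filename.lower() for filename in files.keys())
--
--     if has_src:
--         structure_info.append("Organized source structure (src/ directory)")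
--     if has_components:
--         structure_info.append("Component-based architecture")
--     if has_tests:
--         structure_info.append("Test files present")
--
--     # File type analysis
--     file_types = {}
--     for filename in files.keys():
--         ext = filename.split('.')[-1] if '.' in filename else 'other'
--         file_types[ext] = file_types.get(ext, 0) + 1
--
--     # Most common file types
--     common_types = sorted(file_types.items(), key=lambda x: x[1], reverse=True)[:5]
--     if common_types:
--         type_summary = ', '.join([f"{ext}: {count}" for ext, count in common_types])
--         structure_info.append(f"File types: {type_summary}")
--
--     # Configuration files
--     config_files = [f for f in files.keys() if any(cfg in f for cfg in
--         ['eslint', 'prettier', 'babel', 'webpack', 'vite', 'tsconfig'])]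
--     if config_files:
--         structure_info.append(f"Config files: {', '.join(config_files[:3])}")
--
--     return '\n'.join(f"- {info}" for info in structure_info) if structure_info else "Basic file structure"
-- ===== SOURCE B (Python) =====
-- CONFIG_MARKERS = ('eslint', 'prettier', 'babel', 'webpack', 'vite', 'tsconfig')
--
-- CHECKS = [
--     (lambda f: 'src/' in f, "Organized source structure (src/ directory)"),
--     (lambda f: 'components/' in f, "Component-based architecture"),
--     (lambda f: 'test' in f.lower() or 'spec' in f.lower(), "Test files present"),
-- ]
--
-- def extract_code_structure_summary(repository_data):
--     """Table-driven flag lines; top-5 file types by partial selection (repeated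
--     first-max extraction, no sort); config files by an early-terminating scan."""
--     names = list(repository_data.get('key_files', {}))
--
--     lines = [message for test, message in CHECKS if any(map(test, names))]
--
--     file_types = {}
--     for f in names:
--         ext = f.split('.')[-1] if '.' in f else 'other'
--         file_types[ext] = file_types.get(ext, 0) + 1
--
--     if file_types:
--         pool = list(file_types.items())
--         top = []
--         while pool and len(top) < 5:
--             best = max(pool, key=lambda p: p[1])  # first maximal pair
--             pool.remove(best)
--             top.append(f"{best[0]}: {best[1]}")
--         lines.append("File types: " + ', '.join(top))
--
--     config_hits = []
--     for f in names:
--         if any(m in f for m in CONFIG_MARKERS):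
--             config_hits.append(f)
--             if len(config_hits) == 3:
--                 break
--     if config_hits:
--         lines.append("Config files: " + ', '.join(config_hits))
--
--     return '\n'.join(f"- {line}" for line in lines) if lines else "Basic file structure"
-- ===== Notes on version B (the rewrite author's own statement) =====
-- stated objective: alternative
-- what changed: B drops A's full stable sort + slice and finds the top-5 file types by partial selection (repeatedly extracting the first maximal pair with max/remove), replaces A's filter-then-slice config pass by an early-terminating scan that stops after three hits, and drives the three directory-flag lines from a (predicate, message) table instead of an if-chain.
import Mathlib
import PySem

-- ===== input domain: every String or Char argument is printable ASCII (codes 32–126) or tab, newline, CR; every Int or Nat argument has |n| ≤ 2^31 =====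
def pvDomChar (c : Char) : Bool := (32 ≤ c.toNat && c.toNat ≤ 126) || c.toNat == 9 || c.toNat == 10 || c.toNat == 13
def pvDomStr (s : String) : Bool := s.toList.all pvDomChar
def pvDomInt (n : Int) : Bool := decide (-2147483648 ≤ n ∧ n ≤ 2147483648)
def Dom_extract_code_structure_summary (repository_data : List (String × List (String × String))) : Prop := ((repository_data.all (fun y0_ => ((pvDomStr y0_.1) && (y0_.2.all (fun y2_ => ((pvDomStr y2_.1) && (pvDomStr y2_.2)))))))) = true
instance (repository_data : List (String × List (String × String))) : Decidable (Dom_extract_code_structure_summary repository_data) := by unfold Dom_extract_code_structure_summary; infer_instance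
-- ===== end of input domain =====

-- B replaces A's full stable sort + slice for the top-5 file types by a partial selection
-- (repeated first-max extraction), A's filter-then-slice config pass by an early-terminating
-- scan, and A's if-chain for the flag lines by a (predicate, message) table (alternative
-- decomposition/algorithm, no speed claim).

-- shared helper: filename.split('.')[-1] if '.' in filename else 'other'
def pvExt (f : String) : String :=
  if PySem.Str.isIn "." f then PySem.List.pyGetD ((PySem.Str.split? f ".").getD []) (-1) "" else "other"

-- ['eslint', 'prettier', 'babel', 'webpack', 'vite', 'tsconfig']
def pvCfgs : List String := ["eslint", "prettier", "babel", "webpack", "vite", "tsconfig"]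

-- ===== PORT A =====
def extract_code_structure_summary (repository_data : List (String × List (String × String))) : String :=
  let files := PySem.Dict.ofList ((PySem.Dict.ofList repository_data).getD "key_files" [])
  let keys := files.keys
  let has_src := keys.any (fun f => PySem.Str.isIn "src/" f)
  let has_components := keys.any (fun f => PySem.Str.isIn "components/" f)
  let has_tests := keys.any (fun f =>
    PySem.Str.isIn "test" (PySem.Str.lower f) || PySem.Str.isIn "spec" (PySem.Str.lower f))
  let si1 : List String :=
    if has_src then [] ++ ["Organized source structure (src/ directory)"] else []
  let si2 := if has_components then si1 ++ ["Component-based architecture"] else si1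
  let si3 := if has_tests then si2 ++ ["Test files present"] else si2
  let file_types := keys.foldl
    (fun (d : PySem.Dict String Int) f => d.insert (pvExt f) (d.getD (pvExt f) 0 + 1))
    PySem.Dict.empty
  let common_types := (PySem.List.sorted file_types.items (fun x => x.2) true).take 5
  let si4 := if common_types.isEmpty then si3 else
    si3 ++ ["File types: " ++
      PySem.Str.join ", " (common_types.map (fun p => p.1 ++ ": " ++ PySem.Int.toStr p.2))]
  let config_files := keys.filter (fun f => pvCfgs.any (fun cfg => PySem.Str.isIn cfg f))
  let si5 := if config_files.isEmpty then si4 else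
    si4 ++ ["Config files: " ++ PySem.Str.join ", " (config_files.take 3)]
  if si5.isEmpty then "Basic file structure"
  else PySem.Str.join "\n" (si5.map (fun info => "- " ++ info))

-- ===== PORT B =====
-- the CHECKS table of (predicate, message) pairs
def pvChecks : List ((String → Bool) × String) :=
  [(fun f => PySem.Str.isIn "src/" f, "Organized source structure (src/ directory)"),
   (fun f => PySem.Str.isIn "components/" f, "Component-based architecture"),
   (fun f => PySem.Str.isIn "test" (PySem.Str.lower f) || PySem.Str.isIn "spec" (PySem.Str.lower f),
    "Test files present")]

-- termination helper for the selection loop (list.remove shortens the pool)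
theorem pvRemoveLen {α : Type} [BEq α] [LawfulBEq α] {xs r : List α} {v : α}
    (h : PySem.List.remove? xs v = some r) : r.length < xs.length := by
  simp only [PySem.List.remove?, Option.map_eq_some_iff] at h
  obtain ⟨k, hk, rfl⟩ := h
  obtain ⟨hlt, -⟩ := List.idxOf?_eq_some_iff.mp hk
  rw [List.length_eraseIdx_of_lt hlt]; omega

-- B's while loop: while pool and len(top) < 5: best = max(pool, key=snd); pool.remove(best); top.append(fmt best)
def pvSelectTop (pool : List (String × Int)) (top : List String) : List String :=
  if pool.isEmpty || 5 ≤ top.length then top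
  else
    match PySem.List.max? pool (fun p => p.2) with
    | none => top   -- unreachable: pool is nonempty here
    | some best =>
      match hr : PySem.List.remove? pool best with
      | none => top -- unreachable: best ∈ pool
      | some rest => pvSelectTop rest (top ++ [best.1 ++ ": " ++ PySem.Int.toStr best.2])
termination_by pool.length
decreasing_by exact pvRemoveLen hr

-- B's early-terminating config scan: append matches, break after the third
def pvCfgScan (names : List String) (acc : List String) : List String :=
  match names with
  | [] => acc
  | f :: rest =>
    if pvCfgs.any (fun m => PySem.Str.isIn m f) then
      if (acc ++ [f]).length == 3 then acc ++ [f] else pvCfgScan rest (acc ++ [f])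
    else pvCfgScan rest acc

def extract_code_structure_summary_alt (repository_data : List (String × List (String × String))) : String :=
  let names := (PySem.Dict.ofList ((PySem.Dict.ofList repository_data).getD "key_files" [])).keys
  let lines1 := (pvChecks.filter (fun c => names.any c.1)).map (fun c => c.2)
  let file_types := names.foldl
    (fun (d : PySem.Dict String Int) f => d.insert (pvExt f) (d.getD (pvExt f) 0 + 1))
    PySem.Dict.empty
  let lines2 := if file_types.items.isEmpty then lines1 else
    lines1 ++ ["File types: " ++ PySem.Str.join ", " (pvSelectTop file_types.items [])]
  let config_hits := pvCfgScan names []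
  let lines3 := if config_hits.isEmpty then lines2 else
    lines2 ++ ["Config files: " ++ PySem.Str.join ", " config_hits]
  if lines3.isEmpty then "Basic file structure"
  else PySem.Str.join "\n" (lines3.map (fun line => "- " ++ line))

-- ===== PRECONDITION & SPEC =====
def Spec_extract_code_structure_summary (repository_data : List (String × List (String × String))) (out : String) : Prop := out = extract_code_structure_summary_alt repository_data
instance (repository_data : List (String × List (String × String))) (out : String) : Decidable (Spec_extract_code_structure_summary repository_data out) := by unfold Spec_extract_code_structure_summary; infer_instance

-- ===== CLAIM (what is proved, stated in full; the proofs are below) =====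
def Claim_equal_extract_code_structure_summary : Prop := ∀ (repository_data : List (String × List (String × String))), Dom_extract_code_structure_summary repository_data → Spec_extract_code_structure_summary repository_data (extract_code_structure_summary repository_data)

-- ===== LEMMAS AND PROOFS =====

-- stable descending sort processed one snoc at a time
theorem pv_sorted_snoc {α κ : Type} [LinearOrder κ] (xs : List α) (x : α) (key : α → κ) :
    PySem.List.sorted (xs ++ [x]) key true =
      PySem.List.insertBy (fun a b => decide (key b < key a)) x (PySem.List.sorted xs key true) := by
  rw [PySem.List.sorted_rev_eq_foldl_insertBy, PySem.List.sorted_rev_eq_foldl_insertBy,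
    List.foldl_append, List.foldl_cons, List.foldl_nil]

theorem pv_max?_snoc {α κ : Type} [LinearOrder κ] (xs : List α) (x : α) (key : α → κ) :
    PySem.List.max? (xs ++ [x]) key =
      match PySem.List.max? xs key with
      | none => some x
      | some m => if key m < key x then some x else some m := by
  simp only [PySem.List.max?, List.foldl_append, List.foldl_cons, List.foldl_nil]
  cases List.foldl
      (fun acc x =>
        match acc with
        | none => some x
        | some m => if key m < key x then some x else some m)
      none xs <;> rfl

-- max? of a nonempty list returns one of its elements
theorem pv_max?_cons_exists {α κ : Type} [LinearOrder κ] (key : α → κ) (l : List α) (a : α) :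
    ∃ m, PySem.List.max? (a :: l) key = some m ∧ (m = a ∨ m ∈ l) := by
  induction l generalizing a with
  | nil => exact ⟨a, by simp [PySem.List.max?], Or.inl rfl⟩
  | cons x t ih =>
    have hstep : PySem.List.max? (a :: x :: t) key
        = PySem.List.max? ((if key a < key x then x else a) :: t) key := by
      by_cases h : key a < key x <;> simp [PySem.List.max?, h]
    obtain ⟨m, hm, hmem⟩ := ih (if key a < key x then x else a)
    refine ⟨m, hstep ▸ hm, ?_⟩
    rcases hmem with h' | h'
    · subst h'; split <;> simp
    · simp [h']

theorem pv_max?_isSome {α κ : Type} [LinearOrder κ] (xs : List α) (key : α → κ)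
    (h : xs ≠ []) : (PySem.List.max? xs key).isSome := by
  cases xs with
  | nil => exact absurd rfl h
  | cons x t =>
    obtain ⟨m, hm, -⟩ := pv_max?_cons_exists key t x
    simp [hm]

theorem pv_max?_mem {α κ : Type} [LinearOrder κ] {xs : List α} {key : α → κ} {m : α}
    (h : PySem.List.max? xs key = some m) : m ∈ xs := by
  cases xs with
  | nil => simp [PySem.List.max?] at h
  | cons x t =>
    obtain ⟨m', hm', hmem⟩ := pv_max?_cons_exists key t x
    rw [hm'] at h
    obtain rfl : m' = m := by simpa using h
    rcases hmem with h' | h' <;> simp [h']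

-- idxOf? looks only at the first block when the element occurs there
theorem pv_idxOf?_append_left {α : Type} [BEq α] [LawfulBEq α] {l : List α} (l' : List α)
    {a : α} {i : Nat} (h : List.idxOf? a l = some i) : List.idxOf? a (l ++ l') = some i := by
  rw [List.idxOf?_eq_some_iff] at h ⊢
  obtain ⟨hlt, ha, hj⟩ := h
  refine ⟨by simp; omega, by rw [List.getElem_append_left hlt]; exact ha, ?_⟩
  intro j hj2
  rw [List.getElem_append_left (by omega)]
  exact hj j (by omega)

-- the head of the stable descending sort is the first maximal element, and the tail is
-- the sort of the list with it removed
theorem pv_sorted_sel {α κ : Type} [LinearOrder κ] [BEq α] [LawfulBEq α]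
    {xs rest : List α} {key : α → κ} {b : α}
    (hm : PySem.List.max? xs key = some b) (hr : PySem.List.remove? xs b = some rest) :
    PySem.List.sorted xs key true = b :: PySem.List.sorted rest key true := by
  induction xs using List.reverseRecOn generalizing rest b with
  | nil => simp [PySem.List.max?] at hm
  | append_singleton xs x ih =>
    rw [pv_max?_snoc] at hm
    cases hmx : PySem.List.max? xs key with
    | none =>
      have hxs : xs = [] := by
        cases hx : xs with
        | nil => rfl
        | cons y t =>
          have := pv_max?_isSome xs key (by simp [hx])
          rw [hmx] at this; simp at this
      subst hxs
      rw [hmx] at hm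
      obtain rfl : b = x := by simpa using hm.symm
      have : rest = [] := by
        simpa [PySem.List.remove?, List.idxOf?_cons] using hr.symm
      subst this
      rfl
    | some m =>
      rw [hmx] at hm
      have hmax := PySem.List.max?_isMax hmx
      by_cases hlt : key m < key x
      · obtain rfl : b = x := by simpa [hlt] using hm.symm
        have hxnin : b ∉ xs := fun hx => absurd hlt (not_lt.mpr (hmax b hx))
        have hidx : List.idxOf? b (xs ++ [b]) = some xs.length := by
          rw [List.idxOf?_eq_some_iff]
          refine ⟨by simp, by simp, ?_⟩
          intro j hj
          rw [List.getElem_append_left hj]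
          exact fun he => hxnin (he ▸ List.getElem_mem hj)
        have hrr : rest = xs := by
          have h2 := hr
          rw [PySem.List.remove?, hidx] at h2
          simpa [List.eraseIdx_append_of_length_le] using h2.symm
        subst hrr
        rw [pv_sorted_snoc]
        cases hs : PySem.List.sorted rest key true with
        | nil => rfl
        | cons h t =>
          have hhm : h ∈ rest := (PySem.List.mem_sorted rest key true h).mp (hs ▸ List.mem_cons_self)
          have hkey : key h < key b := lt_of_le_of_lt (hmax h hhm) hlt
          simp [PySem.List.insertBy, hkey]
      · obtain rfl : b = m := by simpa [hlt] using hm.symm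
        have hmem : b ∈ xs := pv_max?_mem hmx
        obtain ⟨i, hi⟩ := Option.isSome_iff_exists.mp (List.isSome_idxOf?.mpr hmem)
        have hi_lt : i < xs.length := (List.idxOf?_eq_some_iff.mp hi).1
        have hidx : List.idxOf? b (xs ++ [x]) = some i := pv_idxOf?_append_left [x] hi
        have hrx : PySem.List.remove? xs b = some (xs.eraseIdx i) := by
          simp [PySem.List.remove?, hi]
        have hrest : rest = xs.eraseIdx i ++ [x] := by
          have h2 := hr
          rw [PySem.List.remove?, hidx] at h2
          simpa [List.eraseIdx_append_of_lt_length hi_lt] using h2.symm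
        subst hrest
        rw [pv_sorted_snoc, ih hmx hrx, pv_sorted_snoc]
        simp [PySem.List.insertBy, hlt]

-- the selection loop computes the take-5 of the stable descending sort
theorem pv_selectTop_eq (pool : List (String × Int)) (top : List String) :
    pvSelectTop pool top =
      top ++ ((PySem.List.sorted pool (fun p => p.2) true).map
        (fun p => p.1 ++ ": " ++ PySem.Int.toStr p.2)).take (5 - top.length) := by
  have H : ∀ (n : Nat) (pool : List (String × Int)) (top : List String), pool.length ≤ n →
      pvSelectTop pool top =
        top ++ ((PySem.List.sorted pool (fun p => p.2) true).map
          (fun p => p.1 ++ ": " ++ PySem.Int.toStr p.2)).take (5 - top.length) := by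
    intro n
    induction n with
    | zero =>
      intro pool top hlen
      obtain rfl : pool = [] := List.length_eq_zero_iff.mp (Nat.le_zero.mp hlen)
      rw [pvSelectTop]; simp [PySem.List.sorted]
    | succ n ih =>
      intro pool top hlen
      rw [pvSelectTop]
      by_cases hp : pool.isEmpty
      · obtain rfl : pool = [] := List.isEmpty_iff.mp hp
        simp [PySem.List.sorted]
      · by_cases h5 : 5 ≤ top.length
        · simp [hp, h5, Nat.sub_eq_zero_of_le h5]
        · have hne : pool ≠ [] := fun h => hp (by simp [h])
          obtain ⟨b, hm⟩ := Option.isSome_iff_exists.mp (pv_max?_isSome pool (fun p => p.2) hne)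
          have hbmem : b ∈ pool := pv_max?_mem hm
          obtain ⟨i, hi⟩ := Option.isSome_iff_exists.mp (List.isSome_idxOf?.mpr hbmem)
          have hrest : PySem.List.remove? pool b = some (pool.eraseIdx i) := by
            simp [PySem.List.remove?, hi]
          have hlt : (pool.eraseIdx i).length < pool.length := pvRemoveLen hrest
          simp only [hp, h5, Bool.false_or, decide_false, Bool.false_eq_true, if_false]
          rw [hm]
          split
          · rename_i heq; cases heq
          · rename_i rest heq
            obtain rfl : b = rest := by injection heq
            split
            · rename_i heq2; rw [hrest] at heq2; cases heq2
            · rename_i rest1 heq2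
              rw [hrest] at heq2
              obtain rfl : pool.eraseIdx i = rest1 := by injection heq2
              rw [ih (pool.eraseIdx i) (top ++ [b.1 ++ ": " ++ PySem.Int.toStr b.2]) (by omega)]
              rw [pv_sorted_sel hm hrest]
              obtain ⟨k, hk⟩ : ∃ k, 5 - top.length = k + 1 := ⟨5 - top.length - 1, by omega⟩
              have hk' : 5 - (top ++ [b.1 ++ ": " ++ PySem.Int.toStr b.2]).length = k := by
                simp; omega
              rw [hk', hk]
              simp [List.take_succ_cons]
  exact H pool.length pool top le_rfl

-- the early-terminating scan is the take-3 of the filter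
theorem pv_cfgScan_eq (names : List String) (acc : List String) (h : acc.length < 3) :
    pvCfgScan names acc =
      acc ++ (names.filter (fun f => pvCfgs.any (fun m => PySem.Str.isIn m f))).take (3 - acc.length) := by
  induction names generalizing acc with
  | nil => simp [pvCfgScan]
  | cons f rest ih =>
    by_cases hf : (pvCfgs.any fun m => PySem.Str.isIn m f) = true
    · have hfe : ∃ x ∈ pvCfgs, PySem.Chars.isIn x.toList f.toList = true := by
        simpa [PySem.Str.isIn] using hf
      by_cases h3 : (acc ++ [f]).length = 3
      · have h1 : 3 - acc.length = 1 := by simp at h3; omega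
        simp [pvCfgScan, List.filter_cons, hfe, h3, h1, PySem.Str.isIn]
      · have hlen : (acc ++ [f]).length < 3 := by simp at h3 ⊢; omega
        obtain ⟨k, hk⟩ : ∃ k, 3 - acc.length = k + 1 := ⟨3 - acc.length - 1, by omega⟩
        have hk' : 3 - (acc ++ [f]).length = k := by simp; omega
        rw [pvCfgScan]
        simp only [hf, if_true, List.filter_cons, beq_iff_eq, h3, if_false,
          ih (acc ++ [f]) hlen, hk', hk]
        simp [hfe, List.take_succ_cons, PySem.Str.isIn]
    · have hfe : ¬ ∃ x ∈ pvCfgs, PySem.Chars.isIn x.toList f.toList = true := by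
        simpa [PySem.Str.isIn] using hf
      simp [pvCfgScan, List.filter_cons, hfe, ih acc h, PySem.Str.isIn]

-- ===== VERDICT (by name: the statement is the Claim_ definition above) =====
set_option maxHeartbeats 2000000 in
theorem extract_code_structure_summary_spec : Claim_equal_extract_code_structure_summary := by
  intro rd _
  unfold Spec_extract_code_structure_summary
  unfold extract_code_structure_summary extract_code_structure_summary_alt
  dsimp only
  rw [pv_selectTop_eq, pv_cfgScan_eq _ _ (by simp)]
  simp only [pvChecks, List.filter_cons, List.nil_append]
  set keys := (PySem.Dict.ofList ((PySem.Dict.ofList rd).getD "key_files" [])).keys with hkeys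
  set ft := (List.foldl (fun (d : PySem.Dict String Int) f => d.insert (pvExt f) (d.getD (pvExt f) 0 + 1))
    PySem.Dict.empty keys) with hft
  set cf := keys.filter (fun f => pvCfgs.any fun cfg => PySem.Str.isIn cfg f) with hcf
  set st := PySem.List.sorted ft.items (fun x => x.2) true with hst
  have h1 : (st.take 5).isEmpty = ft.items.isEmpty := by
    rw [hst]
    rcases hit : ft.items with _ | ⟨p, t⟩
    · rfl
    · have hne : PySem.List.sorted (p :: t) (fun x => x.2) true ≠ [] := by
        rw [Ne, PySem.List.sorted_eq_nil_iff]; simp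
      obtain ⟨q, u, hq⟩ := List.exists_cons_of_ne_nil hne
      simp [hq]
  have h2 : (cf.take 3).isEmpty = cf.isEmpty := by
    rcases cf with _ | ⟨c, t⟩ <;> simp
  cases hb1 : keys.any (fun f => PySem.Str.isIn "src/" f) <;>
  cases hb2 : keys.any (fun f => PySem.Str.isIn "components/" f) <;>
  cases hb3 : keys.any (fun f =>
    PySem.Str.isIn "test" (PySem.Str.lower f) || PySem.Str.isIn "spec" (PySem.Str.lower f)) <;>
  by_cases he : ft.items = [] <;>
  by_cases hc : cf = [] <;>
  simp [hb1, hb2, hb3, he, hc, h1, h2, hst, PySem.List.sorted_eq_nil_iff, List.map_take]
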